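-- pv_equiv track=rewrite | github.com/heatherj204/csc1030 | week1/wk1-q2.py | move_vow
-- ===== SOURCE A (Python) =====
-- def move_vow(text):
--     vowels = 'aeiouAEIOU'
--     vowonly = ''
--     constonly = ''
--     for letter in text:
--         if letter in vowels:
--             vowonly += letter
--         else:
--             constonly += letter
--     vowfirst = vowonly + constonly
--     return vowfirst
-- ===== SOURCE B (Python) =====
-- def move_vow(text):
--     vowels = 'aeiouAEIOU'
--     return ''.join(sorted(text, key=lambda c: c not in vowels))
-- ===== Notes on version B (the rewrite author's own statement) =====
-- stated objective: idiomatic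
-- what changed: Replaces the two-accumulator partition loop with a single stable sort keyed on non-vowelness, relying on sort stability to keep the original order within vowels and within consonants.
import Mathlib
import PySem

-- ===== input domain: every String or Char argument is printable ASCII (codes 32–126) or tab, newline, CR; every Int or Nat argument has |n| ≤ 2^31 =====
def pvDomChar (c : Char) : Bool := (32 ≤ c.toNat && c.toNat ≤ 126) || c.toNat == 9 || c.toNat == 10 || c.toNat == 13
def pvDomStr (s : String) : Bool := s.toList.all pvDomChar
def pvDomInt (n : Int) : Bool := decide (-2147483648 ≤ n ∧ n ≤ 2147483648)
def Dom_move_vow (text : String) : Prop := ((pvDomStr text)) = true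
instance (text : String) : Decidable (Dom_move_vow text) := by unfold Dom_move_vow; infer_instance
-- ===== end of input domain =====

-- B replaces A's two-accumulator partition loop with one stable sort on the key 'c not in vowels' (idiomatic; not faster).


-- ===== PORT A =====
def move_vow (text : String) : String :=
  let vowels := "aeiouAEIOU"
  let r := text.toList.foldl
    (fun (acc : List Char × List Char) letter =>
      if letter ∈ vowels.toList then (acc.1 ++ [letter], acc.2)
      else (acc.1, acc.2 ++ [letter]))
    ([], [])
  String.ofList (r.1 ++ r.2)

-- ===== PORT B =====
def move_vow_alt (text : String) : String :=
  String.ofList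
    (PySem.List.sorted text.toList (fun c => decide (c ∉ "aeiouAEIOU".toList)) false)

-- ===== PRECONDITION & SPEC =====
def Spec_move_vow (text : String) (out : String) : Prop := out = move_vow_alt text
instance (text : String) (out : String) : Decidable (Spec_move_vow text out) := by unfold Spec_move_vow; infer_instance

-- ===== CLAIM (what is proved, stated in full; the proofs are below) =====
def Claim_equal_move_vow : Prop := ∀ (text : String), Dom_move_vow text → Spec_move_vow text (move_vow text)

-- ===== LEMMAS AND PROOFS =====

-- Inserting an element whose key is false into (falses ++ trues) lands exactly between the groups.
theorem insertBy_key_false {α : Type} (key : α → Bool) (x : α) (vs cs : List α)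
    (hx : key x = false) (hv : ∀ v ∈ vs, key v = false) (hc : ∀ c ∈ cs, key c = true) :
    PySem.List.insertBy (fun a b => decide (key a < key b)) x (vs ++ cs) = vs ++ x :: cs := by
  induction vs with
  | nil =>
    cases cs with
    | nil => rfl
    | cons c cs' =>
      have : key c = true := hc c (by simp)
      simp [PySem.List.insertBy, hx, this]
  | cons v vs' ih =>
    have hkv : key v = false := hv v (by simp)
    simp [PySem.List.insertBy, hx, hkv]
    exact ih (fun w hw => hv w (by simp [hw]))

-- The fold of stable insertion keeps the two key-groups contiguous, each in input order.
theorem foldl_insertBy_partition {α : Type} (key : α → Bool) (xs : List α) :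
    ∀ (vs cs : List α), (∀ v ∈ vs, key v = false) → (∀ c ∈ cs, key c = true) →
    xs.foldl (fun acc x => PySem.List.insertBy (fun a b => decide (key a < key b)) x acc) (vs ++ cs)
      = (vs ++ xs.filter (fun x => !key x)) ++ (cs ++ xs.filter key) := by
  induction xs with
  | nil => intro vs cs _ _; simp
  | cons x xs' ih =>
    intro vs cs hv hc
    cases hkx : key x with
    | false =>
      have h1 : PySem.List.insertBy (fun a b => decide (key a < key b)) x (vs ++ cs)
          = (vs ++ [x]) ++ cs := by
        rw [insertBy_key_false key x vs cs hkx hv hc]; simp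
      simp only [List.foldl_cons, h1]
      rw [ih (vs ++ [x]) cs
        (by intro v hvm; rcases List.mem_append.mp hvm with h | h
            · exact hv v h
            · simp at h; simpa [h] using hkx) hc]
      simp [hkx]
    | true =>
      have hall : ∀ y ∈ vs ++ cs, (fun a b => decide (key a < key b)) x y = false := by
        intro y _; simp [hkx]
      have h1 : PySem.List.insertBy (fun a b => decide (key a < key b)) x (vs ++ cs)
          = vs ++ (cs ++ [x]) := by
        rw [PySem.List.insertBy_of_forall_not_before _ _ _ hall]; simp
      simp only [List.foldl_cons, h1]
      rw [ih vs (cs ++ [x]) hv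
        (by intro c hcm; rcases List.mem_append.mp hcm with h | h
            · exact hc c h
            · simp at h; simpa [h] using hkx)]
      simp [hkx]

-- Stable sort on a boolean key = the false-key elements, then the true-key elements, each in order.
theorem sorted_bool_key {α : Type} (key : α → Bool) (xs : List α) :
    PySem.List.sorted xs key false
      = xs.filter (fun x => !key x) ++ xs.filter key := by
  rw [PySem.List.sorted_eq_foldl_insertBy]
  have := foldl_insertBy_partition key xs [] [] (by simp) (by simp)
  simpa using this

-- A's pair-accumulator loop computes the two filters.
theorem move_vow_foldl (V : List Char) (xs : List Char) :
    ∀ (vs cs : List Char),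
    xs.foldl (fun (acc : List Char × List Char) letter =>
        if letter ∈ V then (acc.1 ++ [letter], acc.2) else (acc.1, acc.2 ++ [letter])) (vs, cs)
      = (vs ++ xs.filter (fun x => decide (x ∈ V)), cs ++ xs.filter (fun x => decide (x ∉ V))) := by
  induction xs with
  | nil => intro vs cs; simp
  | cons x xs' ih =>
    intro vs cs
    by_cases h : x ∈ V <;> simp [h, ih]

-- ===== VERDICT (by name: the statement is the Claim_ definition above) =====
theorem move_vow_spec : Claim_equal_move_vow := by
  intro text _
  unfold Spec_move_vow move_vow move_vow_alt
  simp only [move_vow_foldl, sorted_bool_key]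
  congr 1
  simp [decide_not]
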